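-- pv_equiv track=rewrite | github.com/ska-sa/katsdppipelines | katsdpcal/katsdpcal/calprocs_dask.py | _align_chunks
-- ===== SOURCE A (Python) =====
-- def _align_chunks(chunks, alignment):
--     """Compute a new chunking scheme where chunk boundaries are aligned.
--
--     `chunks` must be a dask chunks specification in normalised form.
--     `alignment` is a dictionary mapping axes to an alignment factor. The return
--     value is a new chunking scheme where all chunk sizes, except possibly the
--     last on each axis, is a multiple of that alignment.
--
--     The implementation tries to minimize the cost of rechunking to the new
--     scheme, while also minimising the number of chunks. Within each existing
--     chunk, the first and last alignment boundaries are split along (which may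
--     be a no-op where the start/end of the chunk is already aligned).
--     """
--
--     out = list(chunks)
--     for axis, align in alignment.items():
--         sizes = []
--         in_pos = 0       # Sum of all processed incoming sizes
--         out_pos = 0      # Sum of generated sizes
--         for c in chunks[axis]:
--             in_end = in_pos + c
--             low = (in_pos + align - 1) // align * align    # first aligned point
--             if low > out_pos and low <= in_end:
--                 sizes.append(low - out_pos)
--                 out_pos = low
--             high = in_end // align * align             # last aligned point
--             if high > out_pos and high >= in_pos:
--                 sizes.append(high - out_pos)
--                 out_pos = high
--             in_pos = in_end
--         # May be a final unaligned piece
--         if out_pos < in_pos: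
--             sizes.append(in_pos - out_pos)
--         out[axis] = tuple(sizes)
--     return tuple(out)
-- ===== SOURCE B (Python) =====
-- def _align_chunks(chunks, alignment):
--     """Boundary-set re-implementation: collect per-chunk first/last aligned
--     positions into a set, sort, append the total, and take successive
--     differences.  Same return value as the original on the stated domain."""
--     out = list(chunks)
--     for axis, align in alignment.items():
--         ends = []
--         t = 0
--         for c in chunks[axis]:
--             t += c
--             ends.append(t)
--         total = ends[-1] if ends else 0
--         bounds = {b
--                   for s, e in zip([0] + ends, ends)
--                   for b in ((s + align - 1) // align * align, e // align * align)
--                   if s <= b <= e}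
--         bs = sorted(b for b in bounds if b > 0)
--         if total > (bs[-1] if bs else 0):
--             bs.append(total)
--         out[axis] = tuple(e - s for s, e in zip([0] + bs, bs))
--     return tuple(out)
-- ===== Notes on version B (the rewrite author's own statement) =====
-- stated objective: alternative
-- what changed: Per axis, instead of A's single threaded loop carrying (sizes, out_pos) and emitting size pieces in flight, B collects each chunk's first/last aligned positions into a set via prefix ends, sorts the positive boundaries, appends the total if needed, and takes successive differences.
-- outside the precondition, e.g. on _align_chunks(((5, -3, 4),), {0: 2}): A returns ((4, 2),), B returns ((2, 2, 2),); on _align_chunks(((3,),), {0: -2}): A returns ((4,),), B returns ((3,),)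
import Mathlib
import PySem

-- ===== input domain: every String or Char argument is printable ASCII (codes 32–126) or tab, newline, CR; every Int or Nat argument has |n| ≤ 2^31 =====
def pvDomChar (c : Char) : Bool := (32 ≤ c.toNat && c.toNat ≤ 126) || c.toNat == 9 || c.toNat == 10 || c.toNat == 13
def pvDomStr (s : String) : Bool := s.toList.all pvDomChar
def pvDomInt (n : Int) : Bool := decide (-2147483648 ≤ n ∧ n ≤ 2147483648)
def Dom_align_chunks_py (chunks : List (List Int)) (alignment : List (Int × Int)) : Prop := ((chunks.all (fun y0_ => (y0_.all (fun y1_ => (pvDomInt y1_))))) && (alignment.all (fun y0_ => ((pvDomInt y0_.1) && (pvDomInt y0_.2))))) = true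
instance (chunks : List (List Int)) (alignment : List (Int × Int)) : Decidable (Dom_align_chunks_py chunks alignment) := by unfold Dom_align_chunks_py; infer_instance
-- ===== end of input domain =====

-- B re-implements each axis by collecting the per-chunk first/last aligned positions into a set, sorting it and taking
-- successive differences, instead of A's single threaded sizes/out_pos accumulator loop (objective: alternative decomposition).

-- ===== PORT A =====
-- A's per-chunk loop body: state (sizes, out_pos, in_pos)
def pvStepA (align : Int) (st : List Int × Int × Int) (c : Int) : List Int × Int × Int :=
  let in_end := st.2.2 + c
  let low := PySem.Int.floordiv (st.2.2 + align - 1) align * align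
  let st1 : List Int × Int :=
    if low > st.2.1 ∧ low ≤ in_end then (st.1 ++ [low - st.2.1], low) else (st.1, st.2.1)
  let high := PySem.Int.floordiv in_end align * align
  let st2 : List Int × Int :=
    if high > st1.2 ∧ high ≥ st.2.2 then (st1.1 ++ [high - st1.2], high) else st1
  (st2.1, st2.2, in_end)

def pvAxisA (cs : List Int) (align : Int) : List Int :=
  let st := cs.foldl (pvStepA align) ([], 0, 0)
  if st.2.1 < st.2.2 then st.1 ++ [st.2.2 - st.2.1] else st.1

def align_chunks_py (chunks : List (List Int)) (alignment : List (Int × Int)) : List (List Int) :=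
  alignment.foldl (fun out p =>
    PySem.List.pySetD out p.1 (pvAxisA (PySem.List.pyGetD chunks p.1 []) p.2)) chunks

-- ===== PORT B =====
-- B's per-axis computation: prefix ends, boundary set, sort, successive differences
def pvAxisB (cs : List Int) (align : Int) : List Int :=
  let ends := (cs.foldl (fun (st : List Int × Int) c => (st.1 ++ [st.2 + c], st.2 + c)) ([], 0)).1
  let total := if ends.isEmpty then 0 else PySem.List.pyGetD ends (-1) 0
  let bounds : PySem.Set Int := PySem.Set.ofList ((List.zip (0 :: ends) ends).flatMap (fun se =>
    let low := PySem.Int.floordiv (se.1 + align - 1) align * align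
    let high := PySem.Int.floordiv se.2 align * align
    (if se.1 ≤ low ∧ low ≤ se.2 then [low] else []) ++
      (if se.1 ≤ high ∧ high ≤ se.2 then [high] else [])))
  let bs := PySem.List.sorted (bounds.filter (fun b => decide (0 < b))) (fun x => x) false
  let bs2 := if total > (if bs.isEmpty then 0 else PySem.List.pyGetD bs (-1) 0) then bs ++ [total] else bs
  (List.zip (0 :: bs2) bs2).map (fun se => se.2 - se.1)

def align_chunks_py_alt (chunks : List (List Int)) (alignment : List (Int × Int)) : List (List Int) :=
  alignment.foldl (fun out p =>
    PySem.List.pySetD out p.1 (pvAxisB (PySem.List.pyGetD chunks p.1 []) p.2)) chunks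

-- ===== PRECONDITION & SPEC =====
-- Pre_ excludes the inputs on which A raises (axis out of range → IndexError, alignment factor 0 → ZeroDivisionError)
-- and, as outside the natural domain of a dask chunks specification, negative alignment factors and negative chunk
-- sizes on an aligned axis, on which A returns accidental values whose sizes no longer tile that axis.
def Pre_align_chunks_py (chunks : List (List Int)) (alignment : List (Int × Int)) : Prop :=
  ∀ p ∈ alignment, PySem.Raise.InRange chunks.length p.1 ∧ 1 ≤ p.2 ∧
    ∀ c ∈ PySem.List.pyGetD chunks p.1 [], 0 ≤ c
instance (chunks : List (List Int)) (alignment : List (Int × Int)) : Decidable (Pre_align_chunks_py chunks alignment) := by unfold Pre_align_chunks_py; infer_instance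

def pvWitness_align_chunks_py : List (List Int) × (List (Int × Int)) := ([[2, 3, 4]], [(0, 2)])

def Spec_align_chunks_py (chunks : List (List Int)) (alignment : List (Int × Int)) (out : List (List Int)) : Prop := out = align_chunks_py_alt chunks alignment
instance (chunks : List (List Int)) (alignment : List (Int × Int)) (out : List (List Int)) : Decidable (Spec_align_chunks_py chunks alignment out) := by unfold Spec_align_chunks_py; infer_instance

-- ===== CLAIM (what is proved, stated in full; the proofs are below) =====
def Claim_equal_align_chunks_py : Prop := ∀ (chunks : List (List Int)) (alignment : List (Int × Int)), Dom_align_chunks_py chunks alignment → Pre_align_chunks_py chunks alignment → Spec_align_chunks_py chunks alignment (align_chunks_py chunks alignment)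

-- ===== LEMMAS AND PROOFS =====

def pvDiffs (a : Int) : List Int → List Int
  | [] => []
  | b :: t => (b - a) :: pvDiffs b t

theorem pvDiffs_append (a x : Int) (l : List Int) :
    pvDiffs a (l ++ [x]) = pvDiffs a l ++ [x - l.getLastD a] := by
  induction l generalizing a with
  | nil => simp [pvDiffs]
  | cons b t ih =>
    simp only [List.cons_append, pvDiffs, ih b, List.cons.injEq, true_and]
    have : (b :: t).getLastD a = t.getLastD b := by cases t <;> rfl
    rw [this]

theorem pvZipDiag (a : Int) (l : List Int) :
    (List.zip (a :: l) l).map (fun se => se.2 - se.1) = pvDiffs a l := by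
  induction l generalizing a with
  | nil => simp [pvDiffs]
  | cons b t ih => simpa [pvDiffs, List.zip] using ih b

theorem pvCeil_ge (s align : Int) (h : 1 ≤ align) :
    s ≤ PySem.Int.floordiv (s + align - 1) align * align := by
  have h1 := PySem.Int.floordiv_mul_add_mod (s + align - 1) align
  have h2 := PySem.Int.mod_nonneg (s + align - 1) (by omega : (0:Int) < align)
  have h3 := PySem.Int.mod_lt (s + align - 1) (by omega : (0:Int) < align)
  omega

theorem pvCeil_least (s align k : Int) (h : 1 ≤ align) (hm : s ≤ k * align) :
    PySem.Int.floordiv (s + align - 1) align * align ≤ k * align := by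
  have h1 := PySem.Int.floordiv_mul_add_mod (s + align - 1) align
  have h2 := PySem.Int.mod_nonneg (s + align - 1) (by omega : (0:Int) < align)
  have hk1 : (k + 1) * align = k * align + align := by ring
  have hlt : PySem.Int.floordiv (s + align - 1) align * align < (k + 1) * align := by omega
  have hq : PySem.Int.floordiv (s + align - 1) align < k + 1 :=
    lt_of_mul_lt_mul_right hlt (by omega)
  exact mul_le_mul_of_nonneg_right (by omega) (by omega)

theorem pvFloor_le (e align : Int) (h : 1 ≤ align) :
    PySem.Int.floordiv e align * align ≤ e := by
  have h1 := PySem.Int.floordiv_mul_add_mod e align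
  have h2 := PySem.Int.mod_nonneg e (by omega : (0:Int) < align)
  omega

theorem pvFloor_greatest (e align k : Int) (h : 1 ≤ align) (hm : k * align ≤ e) :
    k * align ≤ PySem.Int.floordiv e align * align := by
  have h1 := PySem.Int.floordiv_mul_add_mod e align
  have h3 := PySem.Int.mod_lt e (by omega : (0:Int) < align)
  have hq1 : (PySem.Int.floordiv e align + 1) * align = PySem.Int.floordiv e align * align + align := by ring
  have hlt : k * align < (PySem.Int.floordiv e align + 1) * align := by omega
  have hq : k < PySem.Int.floordiv e align + 1 := lt_of_mul_lt_mul_right hlt (by omega)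
  exact mul_le_mul_of_nonneg_right (by omega) (by omega)

theorem pvPairwise_le_getLastD (l : List Int) (hl : l.Pairwise (· < ·)) (y : Int) (hy : y ∈ l) :
    y ≤ l.getLastD 0 := by
  induction l generalizing y with
  | nil => simp at hy
  | cons a t ih =>
    rcases List.pairwise_cons.1 hl with ⟨ha, ht⟩
    cases t with
    | nil => simp at hy; simp [hy]
    | cons b t' =>
      have hstep : (a :: b :: t').getLastD 0 = (b :: t').getLastD 0 := rfl
      rw [hstep]
      rcases List.mem_cons.1 hy with rfl | hy'
      · have h1 : y < b := ha b (by simp)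
        have h2 : b ≤ (b :: t').getLastD 0 := ih ht b (by simp)
        omega
      · exact ih ht y hy'

def pvStepCut (align : Int) (st : List Int × Int) (c : Int) : List Int × Int :=
  let e := st.2 + c
  let low := PySem.Int.floordiv (st.2 + align - 1) align * align
  let k1 := if low > st.1.getLastD 0 ∧ low ≤ e then st.1 ++ [low] else st.1
  let high := PySem.Int.floordiv e align * align
  let k2 := if high > k1.getLastD 0 ∧ high ≥ st.2 then k1 ++ [high] else k1
  (k2, e)

def pvChunkCands (align s c : Int) : List Int :=
  let low := PySem.Int.floordiv (s + align - 1) align * align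
  let high := PySem.Int.floordiv (s + c) align * align
  (if s ≤ low ∧ low ≤ s + c then [low] else []) ++ (if s ≤ high ∧ high ≤ s + c then [high] else [])

theorem pvPairwise_snoc (l : List Int) (x : Int) (hl : l.Pairwise (· < ·))
    (hx : l.getLastD 0 < x) : (l ++ [x]).Pairwise (· < ·) := by
  rw [List.pairwise_append]
  refine ⟨hl, by simp, ?_⟩
  intro a ha b hb
  simp at hb; subst hb
  have := pvPairwise_le_getLastD l hl a ha
  omega

theorem pvStepCut_core (align s c : Int) (K : List Int)
    (ha : 1 ≤ align) (hc : 0 ≤ c) (hs : 0 ≤ s)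
    (hK : K.Pairwise (· < ·)) (hKb : ∀ y ∈ K, 0 < y ∧ y ≤ s) :
    (pvStepCut align (K, s) c).2 = s + c ∧
    (pvStepCut align (K, s) c).1.Pairwise (· < ·) ∧
    (∀ y ∈ (pvStepCut align (K, s) c).1, 0 < y ∧ y ≤ s + c) ∧
    (∀ b : Int, b ∈ (pvStepCut align (K, s) c).1 ↔ b ∈ K ∨ (0 < b ∧ b ∈ pvChunkCands align s c)) := by
  simp only [pvStepCut, pvChunkCands]
  set L := PySem.Int.floordiv (s + align - 1) align * align with hLdef
  set H := PySem.Int.floordiv (s + c) align * align with hHdef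
  have hLs : s ≤ L := pvCeil_ge s align ha
  have hHe : H ≤ s + c := pvFloor_le (s + c) align ha
  have hp0 : 0 ≤ K.getLastD 0 ∧ K.getLastD 0 ≤ s := by
    cases K with
    | nil => simpa using hs
    | cons a t =>
      have hm : (a :: t).getLastD 0 ∈ a :: t := List.mem_of_getLast? rfl
      have := hKb _ hm; omega
  have hpK : 0 < K.getLastD 0 → K.getLastD 0 ∈ K := by
    intro h
    cases K with
    | nil => simp at h
    | cons a t => exact List.mem_of_getLast? rfl
  refine ⟨by trivial, ?_⟩
  by_cases h1 : L > K.getLastD 0 ∧ L ≤ s + c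
  · -- A adds L
    have hL0 : 0 < L := by omega
    have hLH : L ≤ H := pvFloor_greatest (s + c) align _ ha h1.2
    have hBlow : s ≤ L ∧ L ≤ s + c := ⟨hLs, h1.2⟩
    have hBhigh : s ≤ H ∧ H ≤ s + c := ⟨le_trans hLs hLH, hHe⟩
    have hk1last : (K ++ [L]).getLastD 0 = L := List.getLastD_concat
    simp only [if_pos h1, hk1last, if_pos hBlow, if_pos hBhigh]
    by_cases h2 : H > L ∧ H ≥ s
    · have hH0 : 0 < H := by omega
      simp only [if_pos h2]
      have hpw1 : (K ++ [L]).Pairwise (· < ·) :=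
        pvPairwise_snoc K L hK (by omega)
      have hpw2 : (K ++ [L] ++ [H]).Pairwise (· < ·) :=
        pvPairwise_snoc _ H hpw1 (by rw [hk1last]; omega)
      refine ⟨hpw2, ?_, ?_⟩
      · intro y hy
        rcases List.mem_append.1 hy with hy | hy
        · rcases List.mem_append.1 hy with hy | hy
          · have := hKb y hy; omega
          · simp at hy; omega
        · simp at hy; omega
      · intro b
        simp only [List.mem_append, List.mem_singleton]
        constructor
        · rintro ((hb | rfl) | rfl)
          · exact Or.inl hb
          · exact Or.inr ⟨hL0, Or.inl rfl⟩
          · exact Or.inr ⟨hH0, Or.inr rfl⟩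
        · rintro (hb | ⟨hb0, rfl | rfl⟩) <;> tauto
    · -- H ≤ L hence H = L
      have hHL : H = L := by omega
      simp only [if_neg h2]
      have hpw1 : (K ++ [L]).Pairwise (· < ·) :=
        pvPairwise_snoc K L hK (by omega)
      refine ⟨hpw1, ?_, ?_⟩
      · intro y hy
        rcases List.mem_append.1 hy with hy | hy
        · have := hKb y hy; omega
        · simp at hy; omega
      · intro b
        simp only [List.mem_append, List.mem_singleton]
        constructor
        · rintro (hb | rfl)
          · exact Or.inl hb
          · exact Or.inr ⟨hL0, Or.inl rfl⟩
        · rintro (hb | ⟨hb0, rfl | rfl⟩) <;> simp_all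
  · -- A does not add L
    by_cases hLp : L ≤ K.getLastD 0
    · -- L = p = s is an existing cut (or 0)
      have hLps : L = K.getLastD 0 ∧ L = s := by omega
      have hLe : L ≤ s + c := by omega
      have hBlow : s ≤ L ∧ L ≤ s + c := ⟨hLs, hLe⟩
      have hsH : L ≤ H := pvFloor_greatest (s + c) align _ ha hLe
      have hBhigh : s ≤ H ∧ H ≤ s + c := ⟨by omega, hHe⟩
      simp only [if_neg h1, if_pos hBlow, if_pos hBhigh]
      by_cases h2 : H > K.getLastD 0 ∧ H ≥ s
      · have hH0 : 0 < H := by omega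
        simp only [if_pos h2]
        have hpw1 : (K ++ [H]).Pairwise (· < ·) :=
          pvPairwise_snoc K H hK (by omega)
        refine ⟨hpw1, ?_, ?_⟩
        · intro y hy
          rcases List.mem_append.1 hy with hy | hy
          · have := hKb y hy; omega
          · simp at hy; omega
        · intro b
          simp only [List.mem_append, List.mem_singleton]
          constructor
          · rintro (hb | rfl)
            · exact Or.inl hb
            · exact Or.inr ⟨hH0, Or.inr rfl⟩
          · rintro (hb | ⟨hb0, rfl | rfl⟩)
            · exact Or.inl hb
            · exact Or.inl (by rw [hLps.1] at hb0 ⊢; exact hpK hb0)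
            · exact Or.inr rfl
      · -- H = p = s = L
        have hHp : H = K.getLastD 0 := by omega
        simp only [if_neg h2]
        refine ⟨hK, ?_, ?_⟩
        · intro y hy; have := hKb y hy; omega
        · intro b
          simp only [List.mem_append, List.mem_singleton]
          constructor
          · exact fun hb => Or.inl hb
          · rintro (hb | ⟨hb0, rfl | rfl⟩)
            · exact hb
            · exact (by rw [hLps.1] at hb0 ⊢; exact hpK hb0)
            · exact (by rw [hHp] at hb0 ⊢; exact hpK hb0)
    · -- L > e : no aligned point in the chunk
      have hLe : s + c < L := by omega
      have hHs : H < s := by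
        by_contra hcon
        rw [not_lt] at hcon
        have : L ≤ H := pvCeil_least s align (PySem.Int.floordiv (s + c) align) ha hcon
        omega
      have hBlow : ¬ (s ≤ L ∧ L ≤ s + c) := by omega
      have hBhigh : ¬ (s ≤ H ∧ H ≤ s + c) := by omega
      have h2 : ¬ (H > K.getLastD 0 ∧ H ≥ s) := by omega
      simp only [if_neg h1, if_neg h2, if_neg hBlow, if_neg hBhigh]
      refine ⟨hK, ?_, ?_⟩
      · intro y hy; have := hKb y hy; omega
      · intro b; simp

def pvCands (align : Int) : Int → List Int → List Int
  | _, [] => []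
  | s, c :: t => pvChunkCands align s c ++ pvCands align (s + c) t

def pvEndsFrom : Int → List Int → List Int
  | _, [] => []
  | s, c :: t => (s + c) :: pvEndsFrom (s + c) t

theorem pvFold_inv (align : Int) (cs : List Int) (K : List Int) (s : Int)
    (ha : 1 ≤ align) (hcs : ∀ c ∈ cs, 0 ≤ c) (hs : 0 ≤ s)
    (hK : K.Pairwise (· < ·)) (hKb : ∀ y ∈ K, 0 < y ∧ y ≤ s) :
    (cs.foldl (pvStepCut align) (K, s)).2 = s + cs.sum ∧
    (cs.foldl (pvStepCut align) (K, s)).1.Pairwise (· < ·) ∧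
    (∀ y ∈ (cs.foldl (pvStepCut align) (K, s)).1, 0 < y ∧ y ≤ s + cs.sum) ∧
    (∀ b : Int, b ∈ (cs.foldl (pvStepCut align) (K, s)).1 ↔
      b ∈ K ∨ (0 < b ∧ b ∈ pvCands align s cs)) := by
  induction cs generalizing K s with
  | nil => simpa [pvCands] using ⟨hK, hKb⟩
  | cons c t ih =>
    have hc : 0 ≤ c := hcs c (by simp)
    obtain ⟨he, hpw, hb, hmem⟩ := pvStepCut_core align s c K ha hc hs hK hKb
    have hstep : (c :: t).foldl (pvStepCut align) (K, s)
        = t.foldl (pvStepCut align) (pvStepCut align (K, s) c) := rfl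
    have hpair : pvStepCut align (K, s) c = ((pvStepCut align (K, s) c).1, s + c) := by
      rw [← he]
    obtain ⟨ihe, ihpw, ihb, ihmem⟩ := ih (pvStepCut align (K, s) c).1 (s + c)
      (fun x hx => hcs x (by simp [hx])) (by omega) hpw (by simpa [he] using hb)
    rw [hstep, hpair]
    refine ⟨by rw [ihe]; simp [List.sum_cons]; ring, ihpw, ?_, ?_⟩
    · intro y hy
      have := ihb y hy
      simp [List.sum_cons] at this ⊢
      omega
    · intro b
      rw [ihmem b, hmem b]
      simp only [pvCands, List.mem_append]
      tauto

theorem pvStepA_eq (align c : Int) (K : List Int) (ip : Int) :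
    pvStepA align (pvDiffs 0 K, K.getLastD 0, ip) c
    = (pvDiffs 0 (pvStepCut align (K, ip) c).1, (pvStepCut align (K, ip) c).1.getLastD 0,
        (pvStepCut align (K, ip) c).2) := by
  simp only [pvStepA, pvStepCut]
  set L := PySem.Int.floordiv (ip + align - 1) align * align with hL
  set H := PySem.Int.floordiv (ip + c) align * align with hH
  by_cases h1 : L > K.getLastD 0 ∧ L ≤ ip + c
  · simp only [if_pos h1, List.getLastD_concat]
    by_cases h2 : H > L ∧ H ≥ ip
    · simp only [if_pos h2, List.getLastD_concat]
      simp only [pvDiffs_append, List.getLastD_concat]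
    · simp only [if_neg h2]
      simp [pvDiffs_append]
  · simp only [if_neg h1]
    by_cases h2 : H > K.getLastD 0 ∧ H ≥ ip
    · simp only [if_pos h2, List.getLastD_concat]
      simp [pvDiffs_append]
    · simp only [if_neg h2]

theorem pvFoldA_eq (align : Int) (cs : List Int) (K : List Int) (ip : Int) :
    cs.foldl (pvStepA align) (pvDiffs 0 K, K.getLastD 0, ip)
    = (pvDiffs 0 (cs.foldl (pvStepCut align) (K, ip)).1,
        (cs.foldl (pvStepCut align) (K, ip)).1.getLastD 0,
        (cs.foldl (pvStepCut align) (K, ip)).2) := by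
  induction cs generalizing K ip with
  | nil => rfl
  | cons c t ih =>
    rw [List.foldl_cons, pvStepA_eq align c K ip, List.foldl_cons]
    have hpair : pvStepCut align (K, ip) c
        = ((pvStepCut align (K, ip) c).1, (pvStepCut align (K, ip) c).2) := rfl
    rw [hpair]
    exact ih (pvStepCut align (K, ip) c).1 (pvStepCut align (K, ip) c).2

theorem pvEnds_eq (cs : List Int) (acc : List Int) (t : Int) :
    cs.foldl (fun (st : List Int × Int) c => (st.1 ++ [st.2 + c], st.2 + c)) (acc, t)
      = (acc ++ pvEndsFrom t cs, t + cs.sum) := by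
  induction cs generalizing acc t with
  | nil => simp [pvEndsFrom]
  | cons c r ih =>
    rw [List.foldl_cons]
    rw [ih (acc ++ [t + c]) (t + c)]
    simp [pvEndsFrom, List.sum_cons]
    ring

theorem pvZipCands (align : Int) (cs : List Int) (s : Int) :
    (List.zip (s :: pvEndsFrom s cs) (pvEndsFrom s cs)).flatMap (fun se =>
      let low := PySem.Int.floordiv (se.1 + align - 1) align * align
      let high := PySem.Int.floordiv se.2 align * align
      (if se.1 ≤ low ∧ low ≤ se.2 then [low] else []) ++
        (if se.1 ≤ high ∧ high ≤ se.2 then [high] else []))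
    = pvCands align s cs := by
  induction cs generalizing s with
  | nil => rfl
  | cons c t ih =>
    show (List.zip (s :: (s + c) :: pvEndsFrom (s + c) t) ((s + c) :: pvEndsFrom (s + c) t)).flatMap _ = _
    rw [List.zip_cons_cons, List.flatMap_cons, ih (s + c)]
    rfl

theorem pvEndsFrom_getLast (cs : List Int) (s : Int) (h : cs ≠ []) (h2 : pvEndsFrom s cs ≠ []) :
    (pvEndsFrom s cs).getLast h2 = s + cs.sum := by
  induction cs generalizing s with
  | nil => simp at h
  | cons c t ih =>
    cases t with
    | nil => simp [pvEndsFrom]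
    | cons d r =>
      show ((s + c) :: pvEndsFrom (s + c) (d :: r)).getLast _ = _
      rw [List.getLast_cons (by simp [pvEndsFrom])]
      rw [ih (s + c) (by simp) (by simp [pvEndsFrom])]
      simp [List.sum_cons]; ring

theorem pvGetLastD_eq_getLast (l : List Int) (h : l ≠ []) : l.getLastD 0 = l.getLast h := by
  rw [List.getLastD_eq_getLast?, List.getLast?_eq_some_getLast h]; rfl

theorem pvAxis_eq (cs : List Int) (align : Int) (ha : 1 ≤ align) (hcs : ∀ c ∈ cs, 0 ≤ c) :
    pvAxisA cs align = pvAxisB cs align := by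
  obtain ⟨hF2, hpw, hbnd, hmem⟩ :=
    pvFold_inv align cs [] 0 ha hcs le_rfl (by simp) (by simp)
  set F := cs.foldl (pvStepCut align) ([], 0) with hF
  -- A side
  have hA : pvAxisA cs align =
      if F.1.getLastD 0 < F.2 then pvDiffs 0 F.1 ++ [F.2 - F.1.getLastD 0] else pvDiffs 0 F.1 := by
    unfold pvAxisA
    have h0 : (([], 0, 0) : List Int × Int × Int) = (pvDiffs 0 [], List.getLastD [] 0, 0) := rfl
    rw [h0, pvFoldA_eq align cs [] 0]
  -- B side: the prefix ends
  have hends : (cs.foldl (fun (st : List Int × Int) c => (st.1 ++ [st.2 + c], st.2 + c)) ([], 0)).1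
      = pvEndsFrom 0 cs := by rw [pvEnds_eq]; simp
  have htotal : (if (pvEndsFrom 0 cs).isEmpty then 0
      else PySem.List.pyGetD (pvEndsFrom 0 cs) (-1) 0) = cs.sum := by
    cases cs with
    | nil => rfl
    | cons c t =>
      have hne : pvEndsFrom 0 (c :: t) ≠ [] := by simp [pvEndsFrom]
      rw [if_neg (by simpa using hne), PySem.List.pyGetD_neg_one _ _ hne,
        pvEndsFrom_getLast _ _ (by simp) hne]
      simp
  have hcands := pvZipCands align cs 0
  -- the sorted deduplicated positive boundaries are exactly A's cuts
  have hbs : PySem.List.sorted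
      ((PySem.Set.ofList (pvCands align 0 cs)).filter (fun b => decide (0 < b)))
      (fun x => x) false = F.1 := by
    apply PySem.List.sorted_eq_of_perm_of_pairwise_lt
    · apply (List.perm_ext_iff_of_nodup (hpw.imp (fun hab => ne_of_lt hab))
        ((PySem.Set.nodup_ofList _).filter _)).mpr
      intro b
      rw [List.mem_filter, decide_eq_true_eq, PySem.Set.mem_ofList]
      rw [hmem b]
      simp [and_comm]
    · exact hpw
  -- assemble B
  unfold pvAxisB
  simp only [hends, htotal, hcands, hbs]
  have hlast : (if F.1.isEmpty then 0 else PySem.List.pyGetD F.1 (-1) 0) = F.1.getLastD 0 := by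
    cases hFe : F.1 with
    | nil => rfl
    | cons a t =>
      rw [if_neg (by simp), PySem.List.pyGetD_neg_one _ _ (by simp),
        pvGetLastD_eq_getLast _ (by simp)]
  rw [hlast, hA, pvZipDiag]
  have hF2sum : F.2 = cs.sum := by simpa using hF2
  by_cases hcond : F.1.getLastD 0 < F.2
  · rw [if_pos hcond, if_pos (by omega), pvDiffs_append, hF2sum]
  · rw [if_neg hcond, if_neg (by omega)]

-- ===== VERDICT (by name: the statement is the Claim_ definition above) =====
theorem align_chunks_py_spec : Claim_equal_align_chunks_py := by
  intro chunks alignment _hdom hpre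
  unfold Spec_align_chunks_py align_chunks_py align_chunks_py_alt
  apply PySem.List.foldl_congr_mem
  intro acc p hp
  have h1 := hpre p hp
  rw [pvAxis_eq _ _ h1.2.1 h1.2.2]
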